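-- pv_equiv track=rewrite | github.com/k-harada/AtCoder | ABC/ABC251-300/ABC281/C.py | solve
-- ===== SOURCE A (Python) =====
-- def solve(n, t, a_list):
--     s = sum(a_list)
--     r = t % s
--     for i, a in enumerate(a_list):
--         if r < a:
--             return f"{i + 1} {r}"
--         else:
--             r -= a
--     return "0 0"
-- ===== SOURCE B (Python) =====
-- def solve(n, t, a_list):
--     s = sum(a_list)
--     r = t % s
--     prefix = []
--     c = 0
--     for a in a_list:
--         c += a
--         prefix.append(c)
--     for i, p in enumerate(prefix):
--         if p > r:
--             prev = prefix[i - 1] if i else 0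
--             return f"{i + 1} {r - prev}"
--     return "0 0"
-- ===== Notes on version B (the rewrite author's own statement) =====
-- stated objective: alternative
-- what changed: B precomputes the inclusive prefix-sum list in one pass and then searches it for the first prefix exceeding r (offset = r minus the previous prefix), instead of A's fused scan that mutates the remainder r by subtracting each element.
import Mathlib
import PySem

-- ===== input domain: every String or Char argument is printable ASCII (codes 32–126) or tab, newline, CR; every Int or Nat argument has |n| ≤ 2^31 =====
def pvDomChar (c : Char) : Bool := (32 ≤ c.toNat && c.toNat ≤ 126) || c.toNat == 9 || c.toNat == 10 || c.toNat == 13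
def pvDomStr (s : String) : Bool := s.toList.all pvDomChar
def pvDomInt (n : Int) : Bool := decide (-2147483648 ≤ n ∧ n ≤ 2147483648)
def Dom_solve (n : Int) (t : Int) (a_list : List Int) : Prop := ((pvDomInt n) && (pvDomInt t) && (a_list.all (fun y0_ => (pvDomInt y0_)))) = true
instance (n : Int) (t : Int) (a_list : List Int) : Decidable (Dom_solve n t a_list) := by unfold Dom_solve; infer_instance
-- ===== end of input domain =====

-- B replaces A's fused remainder-mutating scan with a pref-sum list built once,
-- then a search for the first pref exceeding r (objective: alternative decomposition).

-- ===== PORT A =====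
-- the for-loop over enumerate(a_list) with the running remainder r and early return
def solveLoopA (r : Int) (i : Nat) : List Int → String
  | [] => "0 0"
  | a :: rest =>
      if r < a then PySem.Int.toStr ((i : Int) + 1) ++ " " ++ PySem.Int.toStr r
      else solveLoopA (r - a) (i + 1) rest

def solve (n : Int) (t : Int) (a_list : List Int) : String :=
  let s := a_list.foldl (· + ·) 0
  let r := PySem.Int.mod t s
  solveLoopA r 0 a_list

-- ===== PORT B =====
-- first pass of B: prefix.append(c) with the running sum c
def buildPrefix (c : Int) : List Int → List Int
  | [] => []
  | a :: rest => (c + a) :: buildPrefix (c + a) rest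

-- second pass of B: for i, p in enumerate(pref): if p > r: …
-- (pref[i - 1] is always in range when i ≠ 0 here, so Python indexing is exact; .getD is never the default)
def searchB (r : Int) (pref : List Int) (i : Nat) : List Int → String
  | [] => "0 0"
  | p :: rest =>
      if p > r then
        let prev : Int := if i = 0 then 0 else (PySem.List.pyGet? pref ((i : Int) - 1)).getD 0
        PySem.Int.toStr ((i : Int) + 1) ++ " " ++ PySem.Int.toStr (r - prev)
      else searchB r pref (i + 1) rest

def solve_alt (n : Int) (t : Int) (a_list : List Int) : String :=
  let s := a_list.foldl (· + ·) 0
  let r := PySem.Int.mod t s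
  let pref := buildPrefix 0 a_list
  searchB r pref 0 pref

-- ===== PRECONDITION & SPEC =====
-- Pre_ excludes exactly the inputs with sum(a_list) == 0, where 't % s' raises ZeroDivisionError in A (and in B).
def Pre_solve (n : Int) (t : Int) (a_list : List Int) : Prop := a_list.foldl (· + ·) 0 ≠ 0
instance (n : Int) (t : Int) (a_list : List Int) : Decidable (Pre_solve n t a_list) := by unfold Pre_solve; infer_instance
def pvWitness_solve : Int × Int × List Int := (3, 7, [2, 1, 4])

def Spec_solve (n : Int) (t : Int) (a_list : List Int) (out : String) : Prop := out = solve_alt n t a_list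
instance (n : Int) (t : Int) (a_list : List Int) (out : String) : Decidable (Spec_solve n t a_list out) := by unfold Spec_solve; infer_instance

-- ===== CLAIM (what is proved, stated in full; the proofs are below) =====
def Claim_equal_solve : Prop := ∀ (n : Int) (t : Int) (a_list : List Int), Dom_solve n t a_list → Pre_solve n t a_list → Spec_solve n t a_list (solve n t a_list)

-- ===== LEMMAS AND PROOFS =====

-- Core invariant: A's fused loop at accumulated total c equals B's search over the
-- remaining pref suffix, provided the full list P records c at position i-1.
theorem loopA_eq_searchB (r0 : Int) (P : List Int) :
    ∀ (xs : List Int) (c : Int) (i : Nat),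
      P.drop i = buildPrefix c xs →
      (if i = 0 then c = 0 else PySem.List.pyGet? P ((i : Int) - 1) = some c) →
      solveLoopA (r0 - c) i xs = searchB r0 P i (buildPrefix c xs)
  | [], c, i, _, _ => by simp [solveLoopA, buildPrefix, searchB]
  | a :: rest, c, i, h1, h2 => by
      have hhead : P[i]? = some (c + a) := by
        have := congrArg List.head? h1
        simpa [List.head?_drop, buildPrefix] using this
      simp only [buildPrefix, searchB, solveLoopA]
      by_cases hc : c + a > r0
      · have hlt : r0 - c < a := by omega
        simp only [if_pos hc, if_pos hlt]
        have hprev : (if i = 0 then (0:Int) else (PySem.List.pyGet? P ((i : Int) - 1)).getD 0) = c := by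
          by_cases hi : i = 0
          · simp [hi] at h2 ⊢; omega
          · rw [if_neg hi] at h2 ⊢
            rw [h2]; rfl
        rw [hprev]
      · have hlt : ¬ (r0 - c < a) := by omega
        simp only [if_neg hc, if_neg hlt]
        have h1' : P.drop (i + 1) = buildPrefix (c + a) rest := by
          have := congrArg List.tail h1
          simpa [List.tail_drop, buildPrefix] using this
        have h2' : (if i + 1 = 0 then c + a = 0 else PySem.List.pyGet? P (((i + 1 : Nat) : Int) - 1) = some (c + a)) := by
          rw [if_neg (Nat.succ_ne_zero i)]
          have : ((i + 1 : Nat) : Int) - 1 = (i : Int) := by push_cast; ring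
          rw [this, PySem.List.pyGet?_natCast]
          exact hhead
        have := loopA_eq_searchB r0 P rest (c + a) (i + 1) h1' h2'
        simpa [sub_sub] using this

-- ===== VERDICT (by name: the statement is the Claim_ definition above) =====
theorem solve_spec : Claim_equal_solve := by
  intro n t a_list _ _
  unfold Spec_solve solve solve_alt
  have h := loopA_eq_searchB (PySem.Int.mod t (a_list.foldl (· + ·) 0)) (buildPrefix 0 a_list)
      a_list 0 0 (by simp) (by simp)
  simpa using h
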